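-- pv_equiv track=rewrite | github.com/anonymous-submission-1234134124/benchmark_set | prog_repair_bench/data_preprocess/completion_dataset.py | split_method_for_completion
-- ===== SOURCE A (Python) =====
-- import math
--
-- def split_method_for_completion(method_code: str, method_declaration: str) -> tuple[str, str]:
--     """
--     Split a method into two parts for code completion task.
--
--     Rules:
--     - Split follows line breaks (no mid-line splits)
--     - Empty lines are NOT counted when calculating the split point
--     - For methods with 0-1 non-empty body lines: prefix = declaration, target = full body
--     - For methods with 2+ non-empty body lines: split roughly in half
--     - First part includes method declaration + first half of body
--     - Second part is what needs to be completed
--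
--     Args:
--         method_declaration: The method declaration line
--         method_body: The method body
--
--     Returns:
--         Tuple of (prefix_code, completion_target)
--         - prefix_code: The first half to provide as context
--         - completion_target: The second half that should be generated
--     """
--     declaration_lines = (method_declaration+'\n').splitlines(keepends=True)
--     body_lines = method_code.splitlines(keepends=True)
--
--     non_empty_body_lines = [line for line in body_lines if line.strip()]
--     num_non_empty_lines = len(non_empty_body_lines)
--
--     # Special case: 0-1 non-empty lines in body
--     # Generate the entire body from signature
--     if num_non_empty_lines <= 1:
--         return "".join(declaration_lines), "".join(body_lines)
--
--     # Number of non-empty lines to generate (round up half)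
--     non_empty_to_generate = math.ceil(num_non_empty_lines / 2)
--
--     # Find the split point by counting non-empty lines
--     non_empty_count = 0
--     split_idx = 0
--
--     for i, line in enumerate(body_lines):
--         if line.strip():  # Non-empty line
--             non_empty_count += 1
--             if non_empty_count >= (num_non_empty_lines - non_empty_to_generate):
--                 split_idx = i + 1
--                 break
--
--     lines_to_keep = split_idx
--
--     # Check if we're splitting in the middle of a docstring
--     # If so, include the complete docstring in the prefix
--     if lines_to_keep < len(body_lines):
--         lines_to_keep = _adjust_for_docstring(body_lines, lines_to_keep)
--
--     # Split the method
--     prefix_lines = declaration_lines + body_lines[:lines_to_keep]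
--     completion_lines = body_lines[lines_to_keep:]
--
--     prefix_code = "".join(prefix_lines)
--     completion_target = "".join(completion_lines)
--
--     return prefix_code, completion_target
--
-- def _adjust_for_docstring(body_lines: list[str], lines_to_keep: int) -> int:
--     """
--     Adjust split point to avoid breaking in the middle of a docstring.
--
--     Args:
--         body_lines: Lines of the method body
--         lines_to_keep: Current split point
--
--     Returns:
--         Adjusted split point that doesn't break docstrings
--     """
--     in_docstring = False
--     docstring_quote = None
--
--     for i in range(lines_to_keep):
--         line = body_lines[i].strip()
--         # Check for docstring start
--         if line.startswith('"""') or line.startswith("'''"):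
--             quote = '"""' if line.startswith('"""') else "'''"
--             # Check if it's a single-line docstring
--             if line.count(quote) >= 2:
--                 continue  # Complete docstring on one line
--             else:
--                 in_docstring = True
--                 docstring_quote = quote
--         # Check for docstring end
--         elif in_docstring and docstring_quote in line:
--             in_docstring = False
--             docstring_quote = None
--
--     return lines_to_keep
-- ===== SOURCE B (Python) =====
-- def split_method_for_completion(method_code: str, method_declaration: str) -> tuple[str, str]:
--     declaration_lines = (method_declaration + '\n').splitlines(keepends=True)
--     body_lines = method_code.splitlines(keepends=True)
--     # index table of the non-empty body lines
--     indices = [i for i, line in enumerate(body_lines) if line.strip()]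
--     num = len(indices)
--     if num <= 1:
--         return "".join(declaration_lines), "".join(body_lines)
--     # A keeps floor(num/2) non-empty lines: split right after the (num//2)-th one
--     split_idx = indices[num // 2 - 1] + 1
--     return "".join(declaration_lines + body_lines[:split_idx]), "".join(body_lines[split_idx:])
-- ===== Notes on version B (the rewrite author's own statement) =====
-- stated objective: simpler
-- what changed: B replaces A's breaking counting loop and the dead _adjust_for_docstring scan by one index table of the non-empty body lines and a direct arithmetic pick of the split boundary (indices[num//2 - 1] + 1).
import Mathlib
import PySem

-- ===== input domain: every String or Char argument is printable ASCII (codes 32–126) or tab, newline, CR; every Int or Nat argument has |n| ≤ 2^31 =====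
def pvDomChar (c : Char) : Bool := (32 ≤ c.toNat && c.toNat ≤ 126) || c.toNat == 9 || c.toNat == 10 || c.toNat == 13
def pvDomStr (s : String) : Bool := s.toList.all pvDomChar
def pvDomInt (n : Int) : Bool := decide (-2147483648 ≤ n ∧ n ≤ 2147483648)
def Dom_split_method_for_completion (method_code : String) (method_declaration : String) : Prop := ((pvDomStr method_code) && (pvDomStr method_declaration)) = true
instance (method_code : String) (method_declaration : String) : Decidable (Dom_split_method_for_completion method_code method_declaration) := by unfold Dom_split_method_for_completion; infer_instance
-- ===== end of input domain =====

-- B replaces A's breaking counting loop (and the dead docstring scan) by an index table of the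
-- non-empty body lines and a direct arithmetic pick of the split boundary; objective: simpler.

-- Shared helper: str.splitlines(keepends=True), ported by hand (PySem.Str.splitlines drops the
-- line endings). Exact on the stated domain, where the only line breaks are '\n', '\r', '\r\n'.
def pySplitKeepAux (acc : List Char) : List Char → List (List Char)
  | [] => if acc.isEmpty then [] else [acc.reverse]
  | '\r' :: '\n' :: rest => (acc.reverse ++ ['\r', '\n']) :: pySplitKeepAux [] rest
  | '\r' :: rest => (acc.reverse ++ ['\r']) :: pySplitKeepAux [] rest
  | '\n' :: rest => (acc.reverse ++ ['\n']) :: pySplitKeepAux [] rest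
  | c :: rest => pySplitKeepAux (c :: acc) rest

-- ===== PORT A =====

-- _adjust_for_docstring: runs the docstring state machine over the first lines_to_keep lines
-- (the state is computed and discarded, exactly as in A) and returns lines_to_keep.
def adjustForDocstring (body_lines : List (List Char)) (lines_to_keep : Nat) : Nat :=
  let _state := (List.range lines_to_keep).foldl
    (fun (st : Bool × Option (List Char)) i =>
      let line := PySem.Chars.strip (PySem.List.pyGetD body_lines (i : Int) [])
      if PySem.Chars.startswith line ['"','"','"'] || PySem.Chars.startswith line ['\'','\'','\''] then
        let quote : List Char := if PySem.Chars.startswith line ['"','"','"'] then ['"','"','"'] else ['\'','\'','\'']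
        if PySem.Chars.count line quote ≥ 2 then st
        else (true, some quote)
      else if st.1 = true then
        -- docstring_quote is always set when in_docstring is true
        match st.2 with
        | some q => if PySem.Chars.isIn q line then (false, none) else st
        | none => st
      else st)
    ((false, none) : Bool × Option (List Char))
  lines_to_keep

-- A's for-loop with break: count non-empty lines until the threshold is reached
def findSplitA (threshold : Nat) : Nat → Nat → List (List Char) → Nat
  | _, _, [] => 0          -- loop exhausted without break: split_idx keeps its initial 0
  | count, i, l :: rest =>
    if !(PySem.Chars.strip l).isEmpty then
      if count + 1 ≥ threshold then i + 1
      else findSplitA threshold (count + 1) (i + 1) rest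
    else findSplitA threshold count (i + 1) rest

def split_method_for_completion (method_code : String) (method_declaration : String) : String × String :=
  let declaration_lines := pySplitKeepAux [] (method_declaration.toList ++ ['\n'])
  let body_lines := pySplitKeepAux [] method_code.toList
  let non_empty_body_lines := body_lines.filter (fun l => !(PySem.Chars.strip l).isEmpty)
  let num := non_empty_body_lines.length
  if num ≤ 1 then
    (String.ofList (PySem.Chars.join [] declaration_lines), String.ofList (PySem.Chars.join [] body_lines))
  else
    -- math.ceil(num/2) is exact here: = (num+1)/2
    let non_empty_to_generate := (num + 1) / 2
    let split_idx := findSplitA (num - non_empty_to_generate) 0 0 body_lines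
    let lines_to_keep := if split_idx < body_lines.length then adjustForDocstring body_lines split_idx else split_idx
    -- lines_to_keep ≥ 0, so body_lines[:k] / body_lines[k:] are take / drop
    (String.ofList (PySem.Chars.join [] (declaration_lines ++ List.take lines_to_keep body_lines)),
     String.ofList (PySem.Chars.join [] (List.drop lines_to_keep body_lines)))

-- ===== PORT B =====

-- [i for i, line in enumerate(body_lines) if line.strip()]
def indicesFrom (i : Nat) : List (List Char) → List Nat
  | [] => []
  | l :: rest => if !(PySem.Chars.strip l).isEmpty then i :: indicesFrom (i + 1) rest
                 else indicesFrom (i + 1) rest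

def split_method_for_completion_alt (method_code : String) (method_declaration : String) : String × String :=
  let declaration_lines := pySplitKeepAux [] (method_declaration.toList ++ ['\n'])
  let body_lines := pySplitKeepAux [] method_code.toList
  let indices := indicesFrom 0 body_lines
  let num := indices.length
  if num ≤ 1 then
    (String.ofList (PySem.Chars.join [] declaration_lines), String.ofList (PySem.Chars.join [] body_lines))
  else
    -- num//2 - 1 < num, so indices[num//2 - 1] is in range
    let split_idx := indices.getD (num / 2 - 1) 0 + 1
    (String.ofList (PySem.Chars.join [] (declaration_lines ++ List.take split_idx body_lines)),
     String.ofList (PySem.Chars.join [] (List.drop split_idx body_lines)))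

-- ===== PRECONDITION & SPEC =====
def Spec_split_method_for_completion (method_code : String) (method_declaration : String) (out : String × String) : Prop := out = split_method_for_completion_alt method_code method_declaration
instance (method_code : String) (method_declaration : String) (out : String × String) : Decidable (Spec_split_method_for_completion method_code method_declaration out) := by unfold Spec_split_method_for_completion; infer_instance

-- ===== CLAIM (what is proved, stated in full; the proofs are below) =====
def Claim_equal_split_method_for_completion : Prop := ∀ (method_code : String) (method_declaration : String), Dom_split_method_for_completion method_code method_declaration → Spec_split_method_for_completion method_code method_declaration (split_method_for_completion method_code method_declaration)

-- ===== LEMMAS AND PROOFS =====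

lemma indicesFrom_length (ls : List (List Char)) : ∀ i,
    (indicesFrom i ls).length = (ls.filter (fun l => !(PySem.Chars.strip l).isEmpty)).length := by
  induction ls with
  | nil => intro i; simp [indicesFrom]
  | cons l rest ih =>
    intro i
    by_cases h : (!(PySem.Chars.strip l).isEmpty) = true
    · simp [indicesFrom, List.filter, h, ih]
    · simp [indicesFrom, List.filter, h, ih]

lemma findSplitA_eq (t : Nat) (ls : List (List Char)) : ∀ c i, c < t →
    t - c ≤ (indicesFrom i ls).length →
    findSplitA t c i ls = (indicesFrom i ls).getD (t - c - 1) 0 + 1 := by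
  induction ls with
  | nil => intro c i hc hle; simp [indicesFrom] at hle; omega
  | cons l rest ih =>
    intro c i hc hle
    by_cases h : (!(PySem.Chars.strip l).isEmpty) = true
    · rw [indicesFrom, if_pos h] at hle ⊢
      rw [findSplitA, if_pos h]
      by_cases hb : c + 1 ≥ t
      · have : t - c - 1 = 0 := by omega
        rw [if_pos hb, this]; rfl
      · rw [if_neg hb]
        have h1 : c + 1 < t := by omega
        have h2 : t - (c + 1) ≤ (indicesFrom (i + 1) rest).length := by
          simp at hle; omega
        rw [ih (c + 1) (i + 1) h1 h2]
        have : t - c - 1 = (t - (c + 1) - 1) + 1 := by omega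
        rw [this]; rfl
    · rw [indicesFrom, if_neg h] at hle ⊢
      rw [findSplitA, if_neg h]
      exact ih c (i + 1) hc hle

-- ===== VERDICT (by name: the statement is the Claim_ definition above) =====
theorem split_method_for_completion_spec : Claim_equal_split_method_for_completion := by
  intro method_code method_declaration _
  unfold Spec_split_method_for_completion split_method_for_completion split_method_for_completion_alt
  simp only []
  set body_lines := pySplitKeepAux [] method_code.toList with hb
  have hnum : (indicesFrom 0 body_lines).length
      = (body_lines.filter (fun l => !(PySem.Chars.strip l).isEmpty)).length :=
    indicesFrom_length body_lines 0
  set num := (body_lines.filter (fun l => !(PySem.Chars.strip l).isEmpty)).length with hn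
  by_cases hle : num ≤ 1
  · rw [if_pos hle, if_pos (by omega : (indicesFrom 0 body_lines).length ≤ 1)]
  · rw [if_neg hle, if_neg (by omega : ¬ (indicesFrom 0 body_lines).length ≤ 1)]
    have ht : num - (num + 1) / 2 = num / 2 := by omega
    have hsplit : findSplitA (num - (num + 1) / 2) 0 0 body_lines
        = (indicesFrom 0 body_lines).getD (num / 2 - 1) 0 + 1 := by
      rw [ht]
      have := findSplitA_eq (num / 2) body_lines 0 0 (by omega) (by omega)
      simpa using this
    rw [hsplit]
    have hidx : (indicesFrom 0 body_lines).length / 2 - 1 = num / 2 - 1 := by omega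
    rw [hidx]
    split
    · rw [adjustForDocstring]
    · rfl
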